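-- pv_equiv track=rewrite | github.com/elkhaligy/LeetCode | 2. Medium/(9) Sep 2024/1. 1894. Find the Student that Will Replace the Chalk/1894. Find the Student that Will Replace the Chalk.py | chalkReplacer_opt
-- ===== SOURCE A (Python) =====
-- def chalkReplacer_opt(chalk: list[int], k: int) -> int:
--     n = len(chalk)
--     cur_index = 0
--     lst_sum = sum(chalk)
--     remainder =  k % lst_sum
--
--     while True:
--         if chalk[cur_index % n] > remainder:
--             return cur_index % n
--         remainder -= chalk[cur_index % n]
--         cur_index += 1
-- ===== SOURCE B (Python) =====
-- def chalkReplacer_opt(chalk: list[int], k: int) -> int: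
--     remainder = k % sum(chalk)
--
--     # Divide and conquer: solve(seg, rem) returns (first index i in seg with
--     # seg[i] > rem - sum(seg[:i]) or None, sum(seg)); halves are merged by
--     # offsetting the right half's budget by the left half's sum.
--     def solve(seg, rem):
--         if not seg:
--             return None, 0
--         if len(seg) == 1:
--             return (0 if seg[0] > rem else None), seg[0]
--         mid = len(seg) // 2
--         rl, sl = solve(seg[:mid], rem)
--         rr, sr = solve(seg[mid:], rem - sl)
--         total = sl + sr
--         if rl is not None:
--             return rl, total
--         if rr is not None:
--             return mid + rr, total
--         return None, total
--
--     res, _ = solve(chalk, remainder)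
--     return res
-- ===== Notes on version B (the rewrite author's own statement) =====
-- stated objective: alternative
-- what changed: Replaces A's sequential subtract-and-rescan loop by a divide-and-conquer recursion that splits the list in halves, returns (first crossing index or None, segment sum) for each half and merges them by offsetting the right half's budget by the left half's sum.
import Mathlib
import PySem

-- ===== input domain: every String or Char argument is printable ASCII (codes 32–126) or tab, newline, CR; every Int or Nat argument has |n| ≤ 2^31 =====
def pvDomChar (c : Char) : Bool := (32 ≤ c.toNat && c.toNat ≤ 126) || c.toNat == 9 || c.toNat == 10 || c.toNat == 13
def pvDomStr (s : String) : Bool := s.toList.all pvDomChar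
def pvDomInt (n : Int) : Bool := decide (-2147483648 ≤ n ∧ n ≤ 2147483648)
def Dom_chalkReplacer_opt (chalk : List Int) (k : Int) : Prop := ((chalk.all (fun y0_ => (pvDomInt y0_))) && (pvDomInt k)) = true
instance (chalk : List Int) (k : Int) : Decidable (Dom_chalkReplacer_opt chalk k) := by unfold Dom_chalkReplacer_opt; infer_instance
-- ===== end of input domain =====

-- B replaces A's sequential subtract-and-rescan loop (modular index, remainder mutated in
-- place) by a divide-and-conquer recursion that splits the list in halves, returns
-- (first crossing index or none, segment sum) for each half and merges them.

-- ===== PORT A =====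
-- A's 'while True' loop; the fuel argument only makes the recursion total (it is never
-- exhausted on Pre_ inputs); 0 on fuel exhaustion / IndexError, both unreachable under Pre_
def chalkLoopA (chalk : List Int) (n : Int) : Nat → Int → Int → Int
  | 0, _, _ => 0
  | fuel+1, curIndex, remainder =>
    match PySem.List.pyGet? chalk (PySem.Int.mod curIndex n) with
    | none => 0
    | some c =>
      if c > remainder then PySem.Int.mod curIndex n
      else chalkLoopA chalk n fuel (curIndex + 1) (remainder - c)

def chalkReplacer_opt (chalk : List Int) (k : Int) : Int :=
  let n : Int := chalk.length
  let lstSum := chalk.sum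
  let remainder := PySem.Int.mod k lstSum
  chalkLoopA chalk n chalk.length 0 remainder

-- ===== PORT B =====
-- Source B's inner 'solve': divide and conquer on the segment; Python's slices seg[:mid] and
-- seg[mid:] with 0 ≤ mid ≤ len(seg) are exactly List.take/List.drop
def solveB (seg : List Int) (rem : Int) : Option Int × Int :=
  if seg.isEmpty then (none, 0)
  else if seg.length = 1 then
    ((if seg.headD 0 > rem then some 0 else none), seg.headD 0)
  else
    let mid := seg.length / 2
    let l := solveB (seg.take mid) rem
    let r := solveB (seg.drop mid) (rem - l.2)
    let total := l.2 + r.2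
    match l.1 with
    | some i => (some i, total)
    | none =>
      match r.1 with
      | some j => (some ((mid : Int) + j), total)
      | none => (none, total)
termination_by seg.length
decreasing_by
  · simp only [List.length_take]
    rename_i h1 h2
    simp [List.isEmpty_iff, ← List.length_eq_zero_iff] at h1
    omega
  · simp only [List.length_drop]
    rename_i h1 h2
    simp [List.isEmpty_iff, ← List.length_eq_zero_iff] at h1
    omega

-- Python returns res, which is None on a crossing-free input; that is unreachable under
-- Pre_ (here 0)
def chalkReplacer_opt_alt (chalk : List Int) (k : Int) : Int :=
  let remainder := PySem.Int.mod k chalk.sum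
  ((solveB chalk remainder).1).getD 0

-- ===== PRECONDITION & SPEC =====
-- Pre_ is exactly the set of inputs on which A terminates normally: outside it A either raises
-- ZeroDivisionError (total 0, incl. empty chalk) or rescans forever (negative total with no
-- cumulative prefix exceeding k % total); A returns on no excluded input.
def Pre_chalkReplacer_opt (chalk : List Int) (k : Int) : Prop :=
  chalk.sum ≠ 0 ∧
    ∃ j ∈ List.range chalk.length, PySem.Int.mod k chalk.sum < (chalk.take (j + 1)).sum
instance (chalk : List Int) (k : Int) : Decidable (Pre_chalkReplacer_opt chalk k) := by
  unfold Pre_chalkReplacer_opt; infer_instance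

def pvWitness_chalkReplacer_opt : List Int × Int := ([1], 0)

def Spec_chalkReplacer_opt (chalk : List Int) (k : Int) (out : Int) : Prop := out = chalkReplacer_opt_alt chalk k
instance (chalk : List Int) (k : Int) (out : Int) : Decidable (Spec_chalkReplacer_opt chalk k out) := by unfold Spec_chalkReplacer_opt; infer_instance

-- ===== CLAIM (what is proved, stated in full; the proofs are below) =====
def Claim_equal_chalkReplacer_opt : Prop := ∀ (chalk : List Int) (k : Int), Dom_chalkReplacer_opt chalk k → Pre_chalkReplacer_opt chalk k → Spec_chalkReplacer_opt chalk k (chalkReplacer_opt chalk k)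

-- ===== LEMMAS AND PROOFS =====

-- the cumulative prefix-sum of chalk up to and including index i
def pvF (chalk : List Int) (i : Nat) : Int := (chalk.take (i + 1)).sum

-- linear specification of 'first crossing': index of the first i with
-- seg[i] > rem - sum(seg[:i]), i.e. rem < inclusive prefix sum at i
def firstCross : List Int → Int → Option Int
  | [], _ => none
  | c :: tl, rem => if c > rem then some 0 else (firstCross tl (rem - c)).map (· + 1)

lemma take_succ_sum (l : List Int) (j : Nat) (hj : j < l.length) :
    (l.take (j + 1)).sum = (l.take j).sum + l[j] :=
  List.sum_take_succ l j hj

lemma firstCross_append (L R : List Int) (rem : Int) :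
    firstCross (L ++ R) rem =
      match firstCross L rem with
      | some i => some i
      | none => (firstCross R (rem - L.sum)).map (· + (L.length : Int)) := by
  induction L generalizing rem with
  | nil => simp [firstCross]
  | cons c tl ih =>
    by_cases h : c > rem
    · simp [firstCross, h]
    · have harg : rem - c - tl.sum = rem - (c + tl.sum) := by ring
      simp only [List.cons_append, firstCross, if_neg h, ih, List.sum_cons, List.length_cons,
        harg]
      cases firstCross tl (rem - c) with
      | some i => simp
      | none =>
        cases firstCross R (rem - (c + tl.sum)) with
        | none => simp
        | some j =>
          simp only [Option.map_some]
          congr 1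
          push_cast
          ring

lemma solveB_eq_aux (n : Nat) : ∀ (seg : List Int) (rem : Int), seg.length ≤ n →
    solveB seg rem = (firstCross seg rem, seg.sum) := by
  induction n with
  | zero =>
    intro seg rem hlen
    have : seg = [] := by
      cases seg with
      | nil => rfl
      | cons _ _ => simp at hlen
    subst this
    rw [solveB]
    simp [firstCross]
  | succ n ih =>
    intro seg rem hlen
    rw [solveB]
    by_cases h1 : seg.isEmpty
    · rw [if_pos h1]
      rw [List.isEmpty_iff] at h1
      subst h1
      simp [firstCross]
    · rw [if_neg h1]
      by_cases h2 : seg.length = 1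
      · rw [if_pos h2]
        obtain ⟨c, tl, rfl⟩ := List.exists_cons_of_ne_nil (by simpa [List.isEmpty_iff] using h1)
        simp only [List.length_cons] at h2
        have htl : tl = [] := by
          cases tl with
          | nil => rfl
          | cons _ _ => simp at h2
        subst htl
        simp [firstCross]
      · rw [if_neg h2]
        have hne : seg.length ≠ 0 := by
          simpa [List.isEmpty_iff, ← List.length_eq_zero_iff] using h1
        have hlen2 : 2 ≤ seg.length := by omega
        set mid := seg.length / 2 with hmid
        have hmid1 : 1 ≤ mid := by omega
        have hmidlt : mid < seg.length := by omega
        have hL : (seg.take mid).length ≤ n := by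
          simp only [List.length_take]
          omega
        have hR : (seg.drop mid).length ≤ n := by
          simp only [List.length_drop]
          omega
        simp only [ih (seg.take mid) rem hL]
        simp only [ih (seg.drop mid) _ hR]
        have hfc := firstCross_append (seg.take mid) (seg.drop mid) rem
        rw [List.take_append_drop] at hfc
        have hsum : (seg.take mid).sum + (seg.drop mid).sum = seg.sum := by
          rw [← List.sum_append, List.take_append_drop]
        have hmlen : ((seg.take mid).length : Int) = (mid : Int) := by
          simp only [List.length_take]
          congr 1
          omega
        rw [hfc, hmlen]
        cases firstCross (seg.take mid) rem with
        | some i => simp [hsum]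
        | none =>
          cases firstCross (seg.drop mid) (rem - (seg.take mid).sum) with
          | none => simp [hsum]
          | some j =>
            simp only [Option.map_some]
            simp [hsum]
            ring

lemma solveB_eq (seg : List Int) (rem : Int) :
    solveB seg rem = (firstCross seg rem, seg.sum) :=
  solveB_eq_aux seg.length seg rem le_rfl

lemma firstCross_at (seg : List Int) (rem : Int) (t : Nat)
    (ht : t < seg.length)
    (hbelow : ∀ i < t, (seg.take (i + 1)).sum ≤ rem)
    (habove : rem < (seg.take (t + 1)).sum) :
    firstCross seg rem = some (t : Int) := by
  induction seg generalizing rem t with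
  | nil => simp at ht
  | cons c tl ih =>
    rw [firstCross]
    match t with
    | 0 =>
      rw [if_pos (by simpa using habove)]
      simp
    | t' + 1 =>
      rw [if_neg (by have := hbelow 0 (by omega); simpa using this)]
      have := ih (rem - c) t' (by simpa using ht)
        (fun i hi => by
          have := hbelow (i + 1) (by omega)
          simp only [List.take_succ_cons, List.sum_cons] at this
          omega)
        (by
          have := habove
          simp only [List.take_succ_cons, List.sum_cons] at this
          omega)
      rw [this]
      simp

lemma chalkLoopA_eq (chalk : List Int) (rem : Int) (t : Nat)
    (ht : t < chalk.length)
    (hbelow : ∀ i < t, pvF chalk i ≤ rem)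
    (habove : rem < pvF chalk t) :
    ∀ (fuel j : Nat), j ≤ t → t + 1 ≤ j + fuel →
      chalkLoopA chalk chalk.length fuel (j : Int) (rem - (chalk.take j).sum) = t := by
  intro fuel
  induction fuel with
  | zero => intro j hj hf; omega
  | succ fu ih =>
    intro j hj hf
    have hjl : j < chalk.length := lt_of_le_of_lt hj ht
    have hmod : PySem.Int.mod (j : Int) (chalk.length : Int) = ((j % chalk.length : Nat) : Int) :=
      PySem.Int.mod_natCast j chalk.length
    have hjm : j % chalk.length = j := Nat.mod_eq_of_lt hjl
    rw [chalkLoopA]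
    rw [hmod, hjm]
    rw [PySem.List.pyGet?_natCast]
    rw [List.getElem?_eq_getElem hjl]
    simp only
    by_cases hcase : j = t
    · subst hcase
      rw [if_pos]
      have := habove
      unfold pvF at this
      rw [take_succ_sum chalk j hjl] at this
      omega
    · have hjt : j < t := lt_of_le_of_ne hj hcase
      rw [if_neg]
      · have hrec := ih (j + 1) (by omega) (by omega)
        rw [take_succ_sum chalk j hjl] at hrec
        push_cast at hrec ⊢
        have : rem - (chalk.take j).sum - chalk[j] = rem - ((chalk.take j).sum + chalk[j]) := by ring
        rw [this]
        exact hrec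
      · have := hbelow j hjt
        unfold pvF at this
        rw [take_succ_sum chalk j hjl] at this
        omega

-- ===== VERDICT (by name: the statement is the Claim_ definition above) =====
theorem chalkReplacer_opt_spec : Claim_equal_chalkReplacer_opt := by
  intro chalk k _hdom hpre
  obtain ⟨hsum, j, hjmem, hjc⟩ := hpre
  rw [List.mem_range] at hjmem
  unfold Spec_chalkReplacer_opt chalkReplacer_opt chalkReplacer_opt_alt
  set rem := PySem.Int.mod k chalk.sum with hrem
  -- t := first index whose inclusive prefix sum exceeds rem (exists by Pre_)
  have hex : ∃ i, rem < pvF chalk i := ⟨j, hjc⟩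
  set t := Nat.find hex with htdef
  have habove : rem < pvF chalk t := Nat.find_spec hex
  have hbelow : ∀ i < t, pvF chalk i ≤ rem := by
    intro i hi
    have := Nat.find_min hex hi
    omega
  have ht : t < chalk.length := lt_of_le_of_lt (Nat.find_min' hex hjc) hjmem
  -- A's side: the scan stops at the first crossing
  have hA : chalkLoopA chalk chalk.length chalk.length 0 rem = (t : Int) := by
    have := chalkLoopA_eq chalk rem t ht hbelow habove chalk.length 0 (by omega) (by omega)
    simpa using this
  -- B's side: the divide-and-conquer finds the same first crossing
  have hB : solveB chalk rem = (some (t : Int), chalk.sum) := by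
    rw [solveB_eq]
    rw [firstCross_at chalk rem t ht (fun i hi => hbelow i hi) habove]
  show chalkLoopA chalk (chalk.length : Int) chalk.length 0 rem = (solveB chalk rem).1.getD 0
  rw [hA, hB]
  rfl
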